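-- pv_equiv track=rewrite | github.com/jiwu51510/texas-holdem-ai | training/flop_bucket_classifier.py | _calculate_straight_potential
-- ===== SOURCE A (Python) =====
-- from typing import List, Dict, Any, Set, Tuple, Optional
--
-- def _calculate_straight_potential(ranks: List[int]) -> int:
--     """计算顺子潜力。
--
--     Args:
--         ranks: 排序后的牌面值列表
--
--     Returns:
--         顺子潜力（0=无, 1=后门顺, 2=两头顺/卡顺, 3=已成顺）
--     """
--     unique_ranks = sorted(set(ranks))
--
--     # 处理 A 可以作为 1 的情况
--     if 14 in unique_ranks:
--         unique_ranks_with_low_ace = sorted(set(unique_ranks + [1]))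
--     else:
--         unique_ranks_with_low_ace = unique_ranks
--
--     # 检查是否已成顺（三张连续）
--     for i in range(len(unique_ranks_with_low_ace) - 2):
--         if (unique_ranks_with_low_ace[i+1] - unique_ranks_with_low_ace[i] == 1 and
--             unique_ranks_with_low_ace[i+2] - unique_ranks_with_low_ace[i+1] == 1):
--             return 3  # 已成顺
--
--     # 计算牌面跨度
--     span = max(unique_ranks) - min(unique_ranks)
--     if 14 in unique_ranks:
--         # 考虑 A 作为 1 的情况
--         span_with_low_ace = max(unique_ranks_with_low_ace) - min(unique_ranks_with_low_ace)
--         span = min(span, span_with_low_ace)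
--
--     # 根据跨度判断顺子潜力
--     if span <= 4:
--         return 2  # 两头顺或卡顺潜力
--     elif span <= 6:
--         return 1  # 后门顺潜力
--     else:
--         return 0  # 无顺子潜力
-- ===== SOURCE B (Python) =====
-- from typing import List
--
-- def _calculate_straight_potential(ranks: List[int]) -> int:
--     present = set(ranks)
--     if 14 in present:
--         present.add(1)  # ace also plays low
--     if any(r + 1 in present and r + 2 in present for r in present):
--         return 3  # three consecutive ranks: made straight
--     span = max(ranks) - min(ranks)
--     if span <= 4:
--         return 2
--     if span <= 6:
--         return 1
--     return 0
-- ===== Notes on version B (the rewrite author's own statement) =====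
-- stated objective: faster
-- what changed: B replaces A's sort-then-adjacent-triple scan with order-free set-membership tests (r, r+1, r+2 all present) and replaces A's dead low-ace span recomputation with the plain max-min span over the raw list; no sorting at all.
import Mathlib
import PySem

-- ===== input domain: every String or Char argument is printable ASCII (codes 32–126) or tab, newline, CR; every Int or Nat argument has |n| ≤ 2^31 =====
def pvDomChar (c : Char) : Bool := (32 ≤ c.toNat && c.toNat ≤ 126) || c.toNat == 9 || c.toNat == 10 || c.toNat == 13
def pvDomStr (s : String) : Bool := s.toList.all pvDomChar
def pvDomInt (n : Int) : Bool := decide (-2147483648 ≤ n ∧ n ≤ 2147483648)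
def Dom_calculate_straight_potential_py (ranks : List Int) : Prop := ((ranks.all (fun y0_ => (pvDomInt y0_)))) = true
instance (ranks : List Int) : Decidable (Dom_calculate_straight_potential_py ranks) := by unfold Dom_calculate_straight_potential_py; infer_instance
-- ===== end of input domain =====

-- B drops the sort entirely (set-membership straight test, plain max-min span over the raw list; measured faster); return values proved equal on nonempty input.

-- ===== PORT A =====
-- the '(for i in range(len-2)) adjacent-triple' scan of A, as structural recursion over the sorted list
def pvTripleScanA : List Int → Bool
  | a :: b :: c :: t => (b - a == 1 && c - b == 1) || pvTripleScanA (b :: c :: t)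
  | _ => false

def calculate_straight_potential_py (ranks : List Int) : Int :=
  let unique_ranks := PySem.List.sorted (PySem.Set.ofList ranks) (fun x => x)
  let unique_ranks_with_low_ace :=
    if unique_ranks.contains 14 then
      PySem.List.sorted (PySem.Set.ofList (unique_ranks ++ [1])) (fun x => x)
    else unique_ranks
  if pvTripleScanA unique_ranks_with_low_ace then 3
  else
    -- max()/min() raise on [] in Python; nonemptiness is Pre_'s, .getD 0 is unreachable there
    let span := (PySem.List.max? unique_ranks (fun x => x)).getD 0
              - (PySem.List.min? unique_ranks (fun x => x)).getD 0
    let span :=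
      if unique_ranks.contains 14 then
        let span_with_low_ace := (PySem.List.max? unique_ranks_with_low_ace (fun x => x)).getD 0
                               - (PySem.List.min? unique_ranks_with_low_ace (fun x => x)).getD 0
        min span span_with_low_ace
      else span
    if span ≤ 4 then 2 else if span ≤ 6 then 1 else 0

-- ===== PORT B =====
def calculate_straight_potential_py_alt (ranks : List Int) : Int :=
  let present := PySem.Set.ofList ranks
  let present := if present.contains 14 then present.add 1 else present
  if present.any (fun r => present.contains (r + 1) && present.contains (r + 2)) then 3
  else
    let span := (PySem.List.max? ranks (fun x => x)).getD 0
              - (PySem.List.min? ranks (fun x => x)).getD 0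
    if span ≤ 4 then 2 else if span ≤ 6 then 1 else 0

-- ===== PRECONDITION & SPEC =====
-- Pre_ excludes only the empty list, on which Python A raises ValueError (max of empty sequence); B raises there too.
def Pre_calculate_straight_potential_py (ranks : List Int) : Prop := ranks ≠ []
instance (ranks : List Int) : Decidable (Pre_calculate_straight_potential_py ranks) := by
  unfold Pre_calculate_straight_potential_py; infer_instance

def pvWitness_calculate_straight_potential_py : List Int := [2, 7, 14]

def Spec_calculate_straight_potential_py (ranks : List Int) (out : Int) : Prop := out = calculate_straight_potential_py_alt ranks
instance (ranks : List Int) (out : Int) : Decidable (Spec_calculate_straight_potential_py ranks out) := by unfold Spec_calculate_straight_potential_py; infer_instance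

-- ===== CLAIM (what is proved, stated in full; the proofs are below) =====
def Claim_equal_calculate_straight_potential_py : Prop := ∀ (ranks : List Int), Dom_calculate_straight_potential_py ranks → Pre_calculate_straight_potential_py ranks → Spec_calculate_straight_potential_py ranks (calculate_straight_potential_py ranks)

-- ===== LEMMAS AND PROOFS =====

-- lifting the scan over a head element
lemma pvTripleScanA_cons (a : Int) (t : List Int) (h : pvTripleScanA t = true) :
    pvTripleScanA (a :: t) = true := by
  match t with
  | [] => simp [pvTripleScanA] at h
  | [b] => simp [pvTripleScanA] at h
  | b :: c :: t' => simp [pvTripleScanA] at h ⊢; tauto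

-- on a strictly increasing list the adjacent-triple scan finds exactly the triples {r, r+1, r+2}
lemma pvTripleScanA_iff (l : List Int) (hp : l.Pairwise (· < ·)) :
    pvTripleScanA l = true ↔ ∃ r, r ∈ l ∧ r + 1 ∈ l ∧ r + 2 ∈ l := by
  induction l with
  | nil => simp [pvTripleScanA]
  | cons a t ih =>
    have ha : ∀ x ∈ t, a < x := (List.pairwise_cons.mp hp).1
    have hpt : t.Pairwise (· < ·) := (List.pairwise_cons.mp hp).2
    constructor
    · intro h
      match t, h with
      | b :: c :: t', h =>
        simp only [pvTripleScanA, Bool.or_eq_true, Bool.and_eq_true, beq_iff_eq] at h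
        rcases h with ⟨h1, h2⟩ | h
        · exact ⟨a, by simp, by simp [show b = a + 1 by omega], by simp [show c = a + 2 by omega]⟩
        · rcases (ih hpt).mp h with ⟨r, hr1, hr2, hr3⟩
          exact ⟨r, by simp [hr1], by simp [hr2], by simp [hr3]⟩
    · rintro ⟨r, hr1, hr2, hr3⟩
      by_cases hra : r = a
      · subst hra
        have h2t : r + 1 ∈ t := by rcases List.mem_cons.mp hr2 with h | h; omega; exact h
        have h3t : r + 2 ∈ t := by rcases List.mem_cons.mp hr3 with h | h; omega; exact h
        match t, h2t, h3t, ha, hpt with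
        | b :: t', h2t, h3t, ha, hpt =>
          have hbt : ∀ x ∈ t', b < x := (List.pairwise_cons.mp hpt).1
          have hb : b = r + 1 := by
            rcases List.mem_cons.mp h2t with h | h
            · omega
            · have := hbt _ h; have := ha b (by simp); omega
          subst hb
          have h3t' : r + 2 ∈ t' := by rcases List.mem_cons.mp h3t with h | h; omega; exact h
          match t', h3t', hbt with
          | c :: t'', h3t', hbt =>
            have hct : ∀ x ∈ t'', c < x := by
              intro x hx
              exact (List.pairwise_cons.mp (List.pairwise_cons.mp hpt).2).1 x hx
            have hc : c = r + 2 := by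
              rcases List.mem_cons.mp h3t' with h | h
              · omega
              · have := hct _ h; have := hbt c (by simp); omega
            subst hc
            simp [pvTripleScanA]
      · have hrt : r ∈ t := by rcases List.mem_cons.mp hr1 with h | h; omega; exact h
        have har : a < r := ha _ hrt
        have h2t : r + 1 ∈ t := by rcases List.mem_cons.mp hr2 with h | h; omega; exact h
        have h3t : r + 2 ∈ t := by rcases List.mem_cons.mp hr3 with h | h; omega; exact h
        exact pvTripleScanA_cons a t ((ih hpt).mpr ⟨r, hrt, h2t, h3t⟩)

-- two nonempty lists with the same members have the same Python max (resp. min)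
lemma pv_max_eq (xs ys : List Int) (hx : xs ≠ []) (hmem : ∀ z : Int, z ∈ xs ↔ z ∈ ys) :
    (PySem.List.max? xs (fun x => x)).getD 0 = (PySem.List.max? ys (fun x => x)).getD 0 := by
  have hy : ys ≠ [] := by
    rcases List.exists_mem_of_ne_nil xs hx with ⟨z, hz⟩
    exact List.ne_nil_of_mem ((hmem z).mp hz)
  rcases Option.ne_none_iff_exists'.mp (fun h => hx ((PySem.List.max?_eq_none_iff xs (fun x : Int => x)).mp h)) with ⟨m, hm⟩
  rcases Option.ne_none_iff_exists'.mp (fun h => hy ((PySem.List.max?_eq_none_iff ys (fun x : Int => x)).mp h)) with ⟨n, hn⟩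
  have h1 : m ≤ n := PySem.List.max?_isMax hn m ((hmem m).mp (PySem.List.max?_mem hm))
  have h2 : n ≤ m := PySem.List.max?_isMax hm n ((hmem n).mpr (PySem.List.max?_mem hn))
  simp [hm, hn]; omega

lemma pv_min_eq (xs ys : List Int) (hx : xs ≠ []) (hmem : ∀ z : Int, z ∈ xs ↔ z ∈ ys) :
    (PySem.List.min? xs (fun x => x)).getD 0 = (PySem.List.min? ys (fun x => x)).getD 0 := by
  have hy : ys ≠ [] := by
    rcases List.exists_mem_of_ne_nil xs hx with ⟨z, hz⟩
    exact List.ne_nil_of_mem ((hmem z).mp hz)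
  rcases Option.ne_none_iff_exists'.mp (fun h => hx ((PySem.List.min?_eq_none_iff xs (fun x : Int => x)).mp h)) with ⟨m, hm⟩
  rcases Option.ne_none_iff_exists'.mp (fun h => hy ((PySem.List.min?_eq_none_iff ys (fun x : Int => x)).mp h)) with ⟨n, hn⟩
  have h1 : n ≤ m := PySem.List.min?_isMin hn m ((hmem m).mp (PySem.List.min?_mem hm))
  have h2 : m ≤ n := PySem.List.min?_isMin hm n ((hmem n).mpr (PySem.List.min?_mem hn))
  simp [hm, hn]; omega

-- A's straight test on a strictly increasing list = B's membership test on any list with the same members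
lemma pv_cond_eq (l p : List Int) (hp : l.Pairwise (· < ·)) (hm : ∀ z : Int, z ∈ l ↔ z ∈ p) :
    pvTripleScanA l = p.any (fun r => p.contains (r + 1) && p.contains (r + 2)) := by
  rw [Bool.eq_iff_iff, pvTripleScanA_iff l hp, List.any_eq_true]
  constructor
  · rintro ⟨r, h1, h2, h3⟩
    refine ⟨r, (hm r).mp h1, ?_⟩
    simp only [Bool.and_eq_true, List.contains_iff_mem]
    exact ⟨(hm _).mp h2, (hm _).mp h3⟩
  · rintro ⟨r, h1, h2⟩
    simp only [Bool.and_eq_true, List.contains_iff_mem] at h2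
    exact ⟨r, (hm r).mpr h1, (hm _).mpr h2.1, (hm _).mpr h2.2⟩

-- ===== VERDICT (by name: the statement is the Claim_ definition above) =====
theorem calculate_straight_potential_py_spec : Claim_equal_calculate_straight_potential_py := by
  intro ranks _ hpre
  show calculate_straight_potential_py ranks = calculate_straight_potential_py_alt ranks
  have hmu : ∀ z : Int, z ∈ PySem.List.sorted (PySem.Set.ofList ranks) (fun x => x) ↔ z ∈ ranks := by
    intro z
    rw [PySem.List.mem_sorted]
    exact PySem.Set.mem_ofList ranks z
  obtain ⟨z0, hz0⟩ := List.exists_mem_of_ne_nil ranks hpre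
  have hune : PySem.List.sorted (PySem.Set.ofList ranks) (fun x : Int => x) ≠ [] :=
    List.ne_nil_of_mem ((hmu z0).mpr hz0)
  have hspan : (PySem.List.max? (PySem.List.sorted (PySem.Set.ofList ranks) (fun x : Int => x)) (fun x => x)).getD 0
             - (PySem.List.min? (PySem.List.sorted (PySem.Set.ofList ranks) (fun x : Int => x)) (fun x => x)).getD 0
             = (PySem.List.max? ranks (fun x => x)).getD 0 - (PySem.List.min? ranks (fun x => x)).getD 0 := by
    rw [pv_max_eq _ ranks hune hmu, pv_min_eq _ ranks hune hmu]
  by_cases h14 : (14 : Int) ∈ ranks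
  · -- 14 present: low ace added on both sides; A's span_with_low_ace is dead code
    have hc14u : (PySem.List.sorted (PySem.Set.ofList ranks) (fun x : Int => x)).contains 14 = true :=
      List.contains_iff_mem.mpr ((hmu 14).mpr h14)
    have hc14p : (PySem.Set.ofList ranks).contains 14 = true :=
      List.contains_iff_mem.mpr ((PySem.Set.mem_ofList ranks 14).mpr h14)
    have hmw : ∀ z : Int, z ∈ PySem.List.sorted (PySem.Set.ofList (PySem.List.sorted (PySem.Set.ofList ranks) (fun x : Int => x) ++ [1])) (fun x => x) ↔ z ∈ ranks ∨ z = 1 := by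
      intro z
      rw [PySem.List.mem_sorted, PySem.Set.mem_ofList, List.mem_append]
      simp [hmu z]
    have hmp : ∀ z : Int, z ∈ PySem.Set.add (PySem.Set.ofList ranks) 1 ↔ z ∈ ranks ∨ z = 1 := by
      intro z; rw [PySem.Set.mem_add, PySem.Set.mem_ofList]
    have hbool := pv_cond_eq _ (PySem.Set.add (PySem.Set.ofList ranks) 1)
      (PySem.List.sorted_ofList_pairwise_lt (PySem.List.sorted (PySem.Set.ofList ranks) (fun x : Int => x) ++ [1]))
      (fun z => (hmw z).trans (hmp z).symm)
    -- extremal values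
    obtain ⟨mxv, hmx⟩ : ∃ m, PySem.List.max? ranks (fun x : Int => x) = some m :=
      Option.ne_none_iff_exists'.mp (fun h => hpre ((PySem.List.max?_eq_none_iff ranks (fun x : Int => x)).mp h))
    obtain ⟨mnv, hmn⟩ : ∃ m, PySem.List.min? ranks (fun x : Int => x) = some m :=
      Option.ne_none_iff_exists'.mp (fun h => hpre ((PySem.List.min?_eq_none_iff ranks (fun x : Int => x)).mp h))
    have hwne : PySem.List.sorted (PySem.Set.ofList (PySem.List.sorted (PySem.Set.ofList ranks) (fun x : Int => x) ++ [1])) (fun x : Int => x) ≠ [] :=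
      List.ne_nil_of_mem ((hmw 14).mpr (Or.inl h14))
    obtain ⟨mxw, hmxw⟩ : ∃ m, PySem.List.max? (PySem.List.sorted (PySem.Set.ofList (PySem.List.sorted (PySem.Set.ofList ranks) (fun x : Int => x) ++ [1])) (fun x : Int => x)) (fun x => x) = some m :=
      Option.ne_none_iff_exists'.mp (fun h => hwne ((PySem.List.max?_eq_none_iff _ (fun x : Int => x)).mp h))
    obtain ⟨mnw, hmnw⟩ : ∃ m, PySem.List.min? (PySem.List.sorted (PySem.Set.ofList (PySem.List.sorted (PySem.Set.ofList ranks) (fun x : Int => x) ++ [1])) (fun x : Int => x)) (fun x => x) = some m :=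
      Option.ne_none_iff_exists'.mp (fun h => hwne ((PySem.List.min?_eq_none_iff _ (fun x : Int => x)).mp h))
    have h1 : mxv ≤ mxw := PySem.List.max?_isMax hmxw mxv ((hmw mxv).mpr (Or.inl (PySem.List.max?_mem hmx)))
    have h14w : (14 : Int) ≤ mxw := PySem.List.max?_isMax hmxw 14 ((hmw 14).mpr (Or.inl h14))
    have h3 : mxw ≤ mxv := by
      rcases (hmw mxw).mp (PySem.List.max?_mem hmxw) with h | h
      · exact PySem.List.max?_isMax hmx mxw h
      · omega
    have h4 : mnw ≤ mnv := PySem.List.min?_isMin hmnw mnv ((hmw mnv).mpr (Or.inl (PySem.List.min?_mem hmn)))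
    have hdead : min ((PySem.List.max? ranks (fun x : Int => x)).getD 0 - (PySem.List.min? ranks (fun x : Int => x)).getD 0)
        ((PySem.List.max? (PySem.List.sorted (PySem.Set.ofList (PySem.List.sorted (PySem.Set.ofList ranks) (fun x : Int => x) ++ [1])) (fun x : Int => x)) (fun x => x)).getD 0
        - (PySem.List.min? (PySem.List.sorted (PySem.Set.ofList (PySem.List.sorted (PySem.Set.ofList ranks) (fun x : Int => x) ++ [1])) (fun x : Int => x)) (fun x => x)).getD 0)
        = (PySem.List.max? ranks (fun x : Int => x)).getD 0 - (PySem.List.min? ranks (fun x : Int => x)).getD 0 := by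
      rw [hmx, hmn, hmxw, hmnw]
      simp only [Option.getD_some]
      omega
    simp only [calculate_straight_potential_py, calculate_straight_potential_py_alt,
      hc14u, hc14p, if_true, hbool, hspan, hdead]
    rfl
  · -- no ace: neither side adds the low ace
    have hc14u : (PySem.List.sorted (PySem.Set.ofList ranks) (fun x : Int => x)).contains 14 = false := by
      rw [Bool.eq_false_iff, ne_eq, List.contains_iff_mem]
      exact fun h => h14 ((hmu 14).mp h)
    have hc14p : (PySem.Set.ofList ranks).contains 14 = false := by
      simp only [PySem.Set.contains, Bool.eq_false_iff, ne_eq, List.contains_iff_mem]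
      exact fun h => h14 ((PySem.Set.mem_ofList ranks 14).mp h)
    have hbool := pv_cond_eq _ (PySem.Set.ofList ranks)
      (PySem.List.sorted_ofList_pairwise_lt ranks)
      (fun z => (hmu z).trans (PySem.Set.mem_ofList ranks z).symm)
    simp only [calculate_straight_potential_py, calculate_straight_potential_py_alt,
      hc14u, hc14p, if_false, Bool.false_eq_true, hbool, hspan]
    rfl
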